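-- pv_equiv track=rewrite | github.com/garyPenhook/W4GNS-General-Logger | src/needed_analyzer.py | _get_next_centurion_level
-- ===== SOURCE A (Python) =====
-- from typing import Dict, List, Optional, Set, Tuple
--
-- def _get_next_centurion_level(current: int) -> Optional[str]:
--     """Get next Centurion endorsement level"""
--     levels = [
--         (100, "Centurion"),
--         (200, "Centurion x2"),
--         (300, "Centurion x3"),
--         (400, "Centurion x4"),
--         (500, "Centurion x5"),
--         (600, "Centurion x6"),
--         (700, "Centurion x7"),
--         (800, "Centurion x8"),
--         (900, "Centurion x9"),
--         (1000, "Centurion x10"),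
--     ]
--
--     for required, level_name in levels:
--         if current < required:
--             return level_name
--
--     return None
-- ===== SOURCE B (Python) =====
-- from typing import Optional
--
-- def _get_next_centurion_level(current: int) -> Optional[str]:
--     """Get next Centurion endorsement level (closed-form arithmetic)."""
--     if current >= 1000:
--         return None
--     if current < 100:
--         return "Centurion"
--     return f"Centurion x{current // 100 + 1}"
-- ===== Notes on version B (the rewrite author's own statement) =====
-- stated objective: simpler
-- what changed: Replaced the ladder scan of the fixed endorsement table with closed-form arithmetic: the next endorsement index is derived directly by floor division of the count, with guards for counts below the first level and at or above the top level.
import Mathlib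
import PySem

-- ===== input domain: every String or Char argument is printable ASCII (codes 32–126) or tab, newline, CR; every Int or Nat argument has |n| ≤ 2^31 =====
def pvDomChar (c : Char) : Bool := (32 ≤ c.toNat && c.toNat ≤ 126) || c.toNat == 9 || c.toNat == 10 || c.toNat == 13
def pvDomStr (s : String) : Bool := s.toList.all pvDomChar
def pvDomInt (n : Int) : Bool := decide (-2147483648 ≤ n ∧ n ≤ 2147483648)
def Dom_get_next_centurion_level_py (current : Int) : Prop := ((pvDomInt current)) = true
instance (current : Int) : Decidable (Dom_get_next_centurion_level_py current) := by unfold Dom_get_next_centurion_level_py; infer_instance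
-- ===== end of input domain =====

-- B replaces A's scan of the 10-entry endorsement table with closed-form arithmetic (current // 100 + 1); objective: simpler.


-- ===== PORT A =====
-- the 'for required, level_name in levels: if current < required: return level_name' loop
def centurionScan (current : Int) : List (Int × String) → Option String
  | [] => none
  | (required, level_name) :: rest =>
      if current < required then some level_name else centurionScan current rest

def get_next_centurion_level_py (current : Int) : Option String :=
  centurionScan current
    [(100, "Centurion"), (200, "Centurion x2"), (300, "Centurion x3"),
     (400, "Centurion x4"), (500, "Centurion x5"), (600, "Centurion x6"),
     (700, "Centurion x7"), (800, "Centurion x8"), (900, "Centurion x9"),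
     (1000, "Centurion x10")]

-- ===== PORT B =====
def get_next_centurion_level_py_alt (current : Int) : Option String :=
  if current ≥ 1000 then none
  else if current < 100 then some "Centurion"
  else some ("Centurion x" ++ PySem.Int.toStr (PySem.Int.floordiv current 100 + 1))

-- ===== PRECONDITION & SPEC =====
def Spec_get_next_centurion_level_py (current : Int) (out : Option String) : Prop := out = get_next_centurion_level_py_alt current
instance (current : Int) (out : Option String) : Decidable (Spec_get_next_centurion_level_py current out) := by unfold Spec_get_next_centurion_level_py; infer_instance

-- ===== CLAIM (what is proved, stated in full; the proofs are below) =====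
def Claim_equal_get_next_centurion_level_py : Prop := ∀ (current : Int), Dom_get_next_centurion_level_py current → Spec_get_next_centurion_level_py current (get_next_centurion_level_py current)

-- ===== LEMMAS AND PROOFS =====
-- the value of the closed form on each 100-band
theorem alt_band (current : Int) (k : Int) (h1 : k * 100 ≤ current) (h2 : current < (k + 1) * 100)
    (hk : 1 ≤ k) (hk9 : k ≤ 9) :
    get_next_centurion_level_py_alt current
      = some ("Centurion x" ++ PySem.Int.toStr (k + 1)) := by
  have hfd : PySem.Int.floordiv current 100 = k :=
    (PySem.Int.floordiv_eq_iff_of_pos (by omega)).mpr ⟨h1, h2⟩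
  unfold get_next_centurion_level_py_alt
  rw [if_neg (by omega), if_neg (by omega), hfd]

theorem centurion_eq_2 : "Centurion x" ++ PySem.Int.toStr (1 + 1) = "Centurion x2" := rfl
theorem centurion_eq_3 : "Centurion x" ++ PySem.Int.toStr (2 + 1) = "Centurion x3" := rfl
theorem centurion_eq_4 : "Centurion x" ++ PySem.Int.toStr (3 + 1) = "Centurion x4" := rfl
theorem centurion_eq_5 : "Centurion x" ++ PySem.Int.toStr (4 + 1) = "Centurion x5" := rfl
theorem centurion_eq_6 : "Centurion x" ++ PySem.Int.toStr (5 + 1) = "Centurion x6" := rfl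
theorem centurion_eq_7 : "Centurion x" ++ PySem.Int.toStr (6 + 1) = "Centurion x7" := rfl
theorem centurion_eq_8 : "Centurion x" ++ PySem.Int.toStr (7 + 1) = "Centurion x8" := rfl
theorem centurion_eq_9 : "Centurion x" ++ PySem.Int.toStr (8 + 1) = "Centurion x9" := rfl
theorem centurion_eq_10 : "Centurion x" ++ PySem.Int.toStr (9 + 1) = "Centurion x10" := rfl

theorem centurion_band_2 (current : Int) (h1 : 100 ≤ current) (h2 : current < 200) :
    get_next_centurion_level_py_alt current = some "Centurion x2" := by
  rw [alt_band current 1 h1 h2 (by omega) (by omega)]; exact congrArg some centurion_eq_2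
theorem centurion_band_3 (current : Int) (h1 : 200 ≤ current) (h2 : current < 300) :
    get_next_centurion_level_py_alt current = some "Centurion x3" := by
  rw [alt_band current 2 h1 h2 (by omega) (by omega)]; exact congrArg some centurion_eq_3
theorem centurion_band_4 (current : Int) (h1 : 300 ≤ current) (h2 : current < 400) :
    get_next_centurion_level_py_alt current = some "Centurion x4" := by
  rw [alt_band current 3 h1 h2 (by omega) (by omega)]; exact congrArg some centurion_eq_4
theorem centurion_band_5 (current : Int) (h1 : 400 ≤ current) (h2 : current < 500) :
    get_next_centurion_level_py_alt current = some "Centurion x5" := by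
  rw [alt_band current 4 h1 h2 (by omega) (by omega)]; exact congrArg some centurion_eq_5
theorem centurion_band_6 (current : Int) (h1 : 500 ≤ current) (h2 : current < 600) :
    get_next_centurion_level_py_alt current = some "Centurion x6" := by
  rw [alt_band current 5 h1 h2 (by omega) (by omega)]; exact congrArg some centurion_eq_6
theorem centurion_band_7 (current : Int) (h1 : 600 ≤ current) (h2 : current < 700) :
    get_next_centurion_level_py_alt current = some "Centurion x7" := by
  rw [alt_band current 6 h1 h2 (by omega) (by omega)]; exact congrArg some centurion_eq_7
theorem centurion_band_8 (current : Int) (h1 : 700 ≤ current) (h2 : current < 800) :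
    get_next_centurion_level_py_alt current = some "Centurion x8" := by
  rw [alt_band current 7 h1 h2 (by omega) (by omega)]; exact congrArg some centurion_eq_8
theorem centurion_band_9 (current : Int) (h1 : 800 ≤ current) (h2 : current < 900) :
    get_next_centurion_level_py_alt current = some "Centurion x9" := by
  rw [alt_band current 8 h1 h2 (by omega) (by omega)]; exact congrArg some centurion_eq_9
theorem centurion_band_10 (current : Int) (h1 : 900 ≤ current) (h2 : current < 1000) :
    get_next_centurion_level_py_alt current = some "Centurion x10" := by
  rw [alt_band current 9 h1 h2 (by omega) (by omega)]; exact congrArg some centurion_eq_10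

-- ===== VERDICT (by name: the statement is the Claim_ definition above) =====
set_option maxHeartbeats 4000000 in
theorem get_next_centurion_level_py_spec : Claim_equal_get_next_centurion_level_py := by
  intro current _
  unfold Spec_get_next_centurion_level_py
  unfold get_next_centurion_level_py
  by_cases h0 : current < 100
  · simp only [centurionScan, get_next_centurion_level_py_alt]
    split_ifs <;> first | omega | rfl
  by_cases h10 : 1000 ≤ current
  · simp only [centurionScan, get_next_centurion_level_py_alt]
    split_ifs <;> first | omega | rfl
  simp only [centurionScan]
  split_ifs <;>
    first
      | omega
      | exact (centurion_band_2 current (by omega) (by omega)).symm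
      | exact (centurion_band_3 current (by omega) (by omega)).symm
      | exact (centurion_band_4 current (by omega) (by omega)).symm
      | exact (centurion_band_5 current (by omega) (by omega)).symm
      | exact (centurion_band_6 current (by omega) (by omega)).symm
      | exact (centurion_band_7 current (by omega) (by omega)).symm
      | exact (centurion_band_8 current (by omega) (by omega)).symm
      | exact (centurion_band_9 current (by omega) (by omega)).symm
      | exact (centurion_band_10 current (by omega) (by omega)).symm
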